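-- pv_equiv track=rewrite | github.com/Remy9926/python-projects | recursion.py | build_empty_lot
-- ===== SOURCE A (Python) =====
-- def build_empty_lot(width, trash, astring, height):
--     """Creates an empty lot street object with the given width and trash. Each
--         recursive step adds to an empty string. If the height of the empty lot
--         is less than the maximum height of the street, then additional
--         whitespace is added to the string.
--
--     Parameters: width is the width of the empty lot.
--
--         trash is the string that is repeated in the empty lot.
--
--         astring is the string that will be returned.
--
--         height is the maximum height of all objects in the original string
--             representation of the street.
--
--     Returns: An empty lot street object representation."""
--     if height > 1:
--         astring += " " * width + "\n"
--         return build_empty_lot(width, trash, astring, height - 1)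
--     else:
--         if width < len(trash):
--             astring += trash[0:width]
--             return astring
--         else:
--             astring += trash
--             return build_empty_lot(width - len(trash), trash, astring, height)
-- ===== SOURCE B (Python) =====
-- def build_empty_lot(width, trash, astring, height):
--     for _ in range(height - 1):
--         astring += " " * width + "\n"
--     rem = width
--     while rem >= len(trash) and len(trash) > 0:
--         astring += trash
--         rem -= len(trash)
--     astring += trash[0:rem]
--     return astring
-- ===== Notes on version B (the rewrite author's own statement) =====
-- stated objective: alternative
-- what changed: Replaces A's accumulator-passing recursion by an iterative two-phase build: a for-loop appends the height-1 blank lines, then a while-loop appends full trash copies and the final partial slice trash[0:rem].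
import Mathlib
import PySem

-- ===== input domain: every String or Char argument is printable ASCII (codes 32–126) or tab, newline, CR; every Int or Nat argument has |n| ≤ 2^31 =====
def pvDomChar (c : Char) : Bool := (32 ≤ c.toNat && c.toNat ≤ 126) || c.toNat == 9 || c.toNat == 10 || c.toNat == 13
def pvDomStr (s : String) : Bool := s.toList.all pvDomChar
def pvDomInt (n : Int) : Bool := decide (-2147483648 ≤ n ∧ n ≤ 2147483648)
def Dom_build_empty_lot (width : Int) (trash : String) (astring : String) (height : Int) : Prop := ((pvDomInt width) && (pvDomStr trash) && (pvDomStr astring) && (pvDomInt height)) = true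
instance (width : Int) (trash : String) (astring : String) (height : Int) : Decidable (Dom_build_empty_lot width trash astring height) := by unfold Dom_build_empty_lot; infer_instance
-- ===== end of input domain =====

-- B replaces A's accumulator recursion by an iterative two-phase build (a fold for the space
-- lines, then a while-style loop appending full trash copies): same values, different decomposition.


-- ===== PORT A =====
-- A's recursion, step for step, on char lists (string facts are proved on the list side).
-- The `trash.length = 0` guard in the last branch only makes the definition total: there
-- (trash empty, width ≥ len(trash) = 0) the Python recurses forever (RecursionError) — outside Pre_.
def pvBuildA (width : Int) (trash : List Char) (astring : List Char) (height : Int) : List Char :=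
  if 1 < height then
    pvBuildA width trash (astring ++ PySem.List.pyRepeat [' '] width ++ ['\n']) (height - 1)
  else
    if width < (trash.length : Int) then
      astring ++ PySem.List.slice trash (some 0) (some width)
    else
      if _htr : trash.length = 0 then
        astring ++ trash
      else
        pvBuildA (width - trash.length) trash (astring ++ trash) height
termination_by ((height - 1).toNat, (width + 1).toNat)
decreasing_by
  · left; omega
  · right; omega

def build_empty_lot (width : Int) (trash : String) (astring : String) (height : Int) : String :=
  String.ofList (pvBuildA width trash.toList astring.toList height)

-- ===== PORT B =====
-- the while loop of Source B: keep appending full trash copies while rem ≥ len(trash) (and trash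
-- is nonempty), then append the partial copy trash[0:rem]
def pvFillB (trash : List Char) (astring : List Char) (rem : Int) : List Char :=
  if _h : (trash.length : Int) ≤ rem ∧ 0 < trash.length then
    pvFillB trash (astring ++ trash) (rem - trash.length)
  else
    astring ++ PySem.List.slice trash (some 0) (some rem)
termination_by (rem + 1).toNat
decreasing_by omega

-- Source B: the `for _ in range(height - 1)` line loop, then the fill loop
def build_empty_lot_alt (width : Int) (trash : String) (astring : String) (height : Int) : String :=
  String.ofList (pvFillB trash.toList
    ((PySem.List.pyRange 0 (height - 1) 1).foldl
      (fun s _ => s ++ (PySem.List.pyRepeat [' '] width ++ ['\n'])) astring.toList)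
    width)

-- ===== PRECONDITION & SPEC =====
-- Pre_ excludes only trash = "" with width ≥ 0, where the Python A recurses forever (RecursionError).
def Pre_build_empty_lot (width : Int) (trash : String) (astring : String) (height : Int) : Prop :=
  trash ≠ "" ∨ width < 0
instance (width : Int) (trash : String) (astring : String) (height : Int) : Decidable (Pre_build_empty_lot width trash astring height) := by unfold Pre_build_empty_lot; infer_instance

def pvWitness_build_empty_lot : Int × String × String × Int := (5, "ab", "", 3)

def Spec_build_empty_lot (width : Int) (trash : String) (astring : String) (height : Int) (out : String) : Prop := out = build_empty_lot_alt width trash astring height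
instance (width : Int) (trash : String) (astring : String) (height : Int) (out : String) : Decidable (Spec_build_empty_lot width trash astring height out) := by unfold Spec_build_empty_lot; infer_instance

-- ===== CLAIM (what is proved, stated in full; the proofs are below) =====
def Claim_equal_build_empty_lot : Prop := ∀ (width : Int) (trash : String) (astring : String) (height : Int), Dom_build_empty_lot width trash astring height → Pre_build_empty_lot width trash astring height → Spec_build_empty_lot width trash astring height (build_empty_lot width trash astring height)

-- ===== LEMMAS AND PROOFS =====

-- a fold that ignores the list elements depends only on the list's length
theorem pvFoldl_const_eq {α β : Type} (g : β → β) (l₁ l₂ : List α) (a : β)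
    (h : l₁.length = l₂.length) :
    l₁.foldl (fun s _ => g s) a = l₂.foldl (fun s _ => g s) a := by
  induction l₁ generalizing l₂ a with
  | nil => cases l₂ <;> simp_all
  | cons x xs ih =>
    cases l₂ with
    | nil => simp_all
    | cons y ys => simpa using ih ys (g a) (by simpa using h)

-- A's recursion computes exactly B's two phases
theorem pvBuildA_eq (width : Int) (trash : List Char) (astring : List Char) (height : Int)
    (hp : trash ≠ [] ∨ width < 0) :
    pvBuildA width trash astring height =
      pvFillB trash
        ((PySem.List.pyRange 0 (height - 1) 1).foldl
          (fun s _ => s ++ (PySem.List.pyRepeat [' '] width ++ ['\n'])) astring) width := by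
  revert hp
  induction width, astring, height using pvBuildA.induct trash with
  | case1 width astring height hgt ih =>
    intro hp
    rw [pvBuildA, if_pos hgt, ih hp]
    have h1 : (0 : Int) < height - 1 := by omega
    rw [PySem.List.pyRange_one_cons h1]
    simp only [List.foldl_cons, List.append_assoc, zero_add]
    refine congrArg (fun s => pvFillB trash s width) (pvFoldl_const_eq _
      (PySem.List.pyRange 0 (height - 1 - 1) 1) (PySem.List.pyRange 1 (height - 1) 1) _ ?_)
    rw [PySem.List.length_pyRange_one, PySem.List.length_pyRange_one]
    omega
  | case2 width astring height hgt hlt =>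
    intro hp
    rw [pvBuildA, if_neg hgt, if_pos hlt, PySem.List.pyRange_one_eq_nil (by omega),
      List.foldl_nil, pvFillB, dif_neg (by omega)]
  | case3 width astring height hgt hlt htr =>
    intro hp
    exfalso
    rcases hp with h | h
    · exact h (List.eq_nil_of_length_eq_zero htr)
    · omega
  | case4 width astring height hgt hlt htr ih =>
    intro hp
    rw [pvBuildA, if_neg hgt, if_neg hlt, dif_neg htr,
      ih (Or.inl (fun hc => htr (by simp [hc]))),
      PySem.List.pyRange_one_eq_nil (by omega), List.foldl_nil, List.foldl_nil]
    conv_rhs => rw [pvFillB]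
    rw [dif_pos ⟨by omega, by omega⟩]

-- ===== VERDICT (by name: the statement is the Claim_ definition above) =====
theorem build_empty_lot_spec : Claim_equal_build_empty_lot := by
  intro width trash astring height _ hpre
  unfold Spec_build_empty_lot build_empty_lot build_empty_lot_alt
  have hp : trash.toList ≠ [] ∨ width < 0 := by
    rcases hpre with h | h
    · exact Or.inl (fun hc => h (String.toList_eq_nil_iff.mp hc))
    · exact Or.inr h
  rw [pvBuildA_eq width trash.toList astring.toList height hp]
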